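-- pv_equiv track=rewrite | github.com/Bobskie-Repositories/SPringBoardFuzzy | backend/springboard_api/FuzzyLogic.py | count_criteria
-- ===== SOURCE A (Python) =====
-- def count_criteria(percentage_dict):
--     criteria = {
--         'Desirability': ['Problem', 'Customer Segment', 'Unique Value Proposition', 'Channels'],
--         'Feasibility': ['Solution', 'Unfair Advantage', 'Key Metrics'],
--         'Viability': ['Revenue Stream', 'Cost Structure']
--     }
--
--     counts = {}
--
--     for category, criteria_list in criteria.items():
--         count = sum(
--             1 for criterion in criteria_list if criterion in percentage_dict)
--         counts[category] = count
--
--     return counts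
-- ===== SOURCE B (Python) =====
-- def count_criteria(percentage_dict):
--     category_of = {
--         'Problem': 'Desirability',
--         'Customer Segment': 'Desirability',
--         'Unique Value Proposition': 'Desirability',
--         'Channels': 'Desirability',
--         'Solution': 'Feasibility',
--         'Unfair Advantage': 'Feasibility',
--         'Key Metrics': 'Feasibility',
--         'Revenue Stream': 'Viability',
--         'Cost Structure': 'Viability',
--     }
--     counts = {'Desirability': 0, 'Feasibility': 0, 'Viability': 0}
--     for key in percentage_dict:
--         category = category_of.get(key)
--         if category is not None:
--             counts[category] = counts[category] + 1
--     return counts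
-- ===== Notes on version B (the rewrite author's own statement) =====
-- stated objective: alternative
-- what changed: Instead of scanning every hardcoded criterion and testing it against the input dict per category, B builds a flat reverse lookup (criterion -> category), initializes all three counts to 0, and makes one pass over the input's keys incrementing the matched category.
import Mathlib
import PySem

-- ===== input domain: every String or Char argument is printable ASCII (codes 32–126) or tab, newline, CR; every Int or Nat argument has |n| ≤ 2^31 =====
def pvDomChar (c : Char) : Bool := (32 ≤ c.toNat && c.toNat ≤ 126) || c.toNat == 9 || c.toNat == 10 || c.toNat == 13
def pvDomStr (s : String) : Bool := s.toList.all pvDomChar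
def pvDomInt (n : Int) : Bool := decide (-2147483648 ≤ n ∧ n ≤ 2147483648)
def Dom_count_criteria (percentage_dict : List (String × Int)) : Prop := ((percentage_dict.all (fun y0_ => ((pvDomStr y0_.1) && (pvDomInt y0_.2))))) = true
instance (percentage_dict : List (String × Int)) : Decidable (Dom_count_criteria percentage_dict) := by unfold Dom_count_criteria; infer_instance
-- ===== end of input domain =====

-- B replaces A's per-category scan of the hardcoded criteria with a flat reverse lookup
-- (criterion -> category) and a single pass over the input's keys (objective: alternative).


-- ===== PORT A =====
def count_criteria (percentage_dict : List (String × Int)) : List (String × Int) :=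
  let criteria : List (String × List String) :=
    [("Desirability", ["Problem", "Customer Segment", "Unique Value Proposition", "Channels"]),
     ("Feasibility", ["Solution", "Unfair Advantage", "Key Metrics"]),
     ("Viability", ["Revenue Stream", "Cost Structure"])]
  let counts : PySem.Dict String Int := criteria.foldl
    (fun counts cl =>
      let count : Int :=
        (cl.2.map (fun criterion =>
          if (PySem.Dict.mk percentage_dict).contains criterion then (1 : Int) else 0)).sum
      counts.insert cl.1 count)
    PySem.Dict.empty
  counts.items

-- ===== PORT B =====
-- the reverse lookup table of Source B
def pvCategoryOf : PySem.Dict String String := PySem.Dict.ofList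
  [("Problem", "Desirability"), ("Customer Segment", "Desirability"),
   ("Unique Value Proposition", "Desirability"), ("Channels", "Desirability"),
   ("Solution", "Feasibility"), ("Unfair Advantage", "Feasibility"),
   ("Key Metrics", "Feasibility"),
   ("Revenue Stream", "Viability"), ("Cost Structure", "Viability")]

-- the body of Source B's loop over the input's keys
def pvStep (counts : PySem.Dict String Int) (key : String) : PySem.Dict String Int :=
  match pvCategoryOf.get? key with
  | some category => counts.insert category (counts.getD category 0 + 1)
  | none => counts

def count_criteria_alt (percentage_dict : List (String × Int)) : List (String × Int) :=
  let counts0 : PySem.Dict String Int :=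
    PySem.Dict.ofList [("Desirability", 0), ("Feasibility", 0), ("Viability", 0)]
  -- 'for key in percentage_dict' iterates the dict's (distinct) keys in insertion order
  ((PySem.List.dedup (percentage_dict.map Prod.fst)).foldl pvStep counts0).items

-- ===== PRECONDITION & SPEC =====
def Spec_count_criteria (percentage_dict : List (String × Int)) (out : List (String × Int)) : Prop := out = count_criteria_alt percentage_dict
instance (percentage_dict : List (String × Int)) (out : List (String × Int)) : Decidable (Spec_count_criteria percentage_dict out) := by unfold Spec_count_criteria; infer_instance

-- ===== CLAIM (what is proved, stated in full; the proofs are below) =====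
def Claim_equal_count_criteria : Prop := ∀ (percentage_dict : List (String × Int)), Dom_count_criteria percentage_dict → Spec_count_criteria percentage_dict (count_criteria percentage_dict)

-- ===== LEMMAS AND PROOFS =====

-- the three criteria lists, for the proofs
def pvCD : List String := ["Problem", "Customer Segment", "Unique Value Proposition", "Channels"]
def pvCF : List String := ["Solution", "Unfair Advantage", "Key Metrics"]
def pvCV : List String := ["Revenue Stream", "Cost Structure"]

-- Source B's step, evaluated on the fixed three-category accumulator
theorem pvStep_some (x y z : Int) (k cat : String) (hg : pvCategoryOf.get? k = some cat)
    (hc : cat = "Desirability" ∨ cat = "Feasibility" ∨ cat = "Viability") :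
    pvStep (PySem.Dict.mk [("Desirability", x), ("Feasibility", y), ("Viability", z)]) k
    = PySem.Dict.mk [("Desirability", if cat = "Desirability" then x + 1 else x),
        ("Feasibility", if cat = "Feasibility" then y + 1 else y),
        ("Viability", if cat = "Viability" then z + 1 else z)] := by
  rw [pvStep, hg]
  rcases hc with rfl | rfl | rfl <;>
    simp [PySem.Dict.insert, PySem.Dict.getD, PySem.Dict.get?]

theorem pvStep_none (d : PySem.Dict String Int) (k : String)
    (hg : pvCategoryOf.get? k = none) : pvStep d k = d := by
  rw [pvStep, hg]

-- what the reverse lookup answers, per membership in the three criteria lists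
theorem pv_get_mem (k : String) :
    (k ∈ pvCD → pvCategoryOf.get? k = some "Desirability") ∧
    (k ∈ pvCF → pvCategoryOf.get? k = some "Feasibility") ∧
    (k ∈ pvCV → pvCategoryOf.get? k = some "Viability") ∧
    (k ∉ pvCD → k ∉ pvCF → k ∉ pvCV → pvCategoryOf.get? k = none) := by
  refine ⟨?_, ?_, ?_, ?_⟩
  · intro h
    simp only [pvCD, List.mem_cons, List.not_mem_nil, or_false] at h
    rcases h with rfl | rfl | rfl | rfl <;> decide
  · intro h
    simp only [pvCF, List.mem_cons, List.not_mem_nil, or_false] at h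
    rcases h with rfl | rfl | rfl <;> decide
  · intro h
    simp only [pvCV, List.mem_cons, List.not_mem_nil, or_false] at h
    rcases h with rfl | rfl <;> decide
  · intro hD hF hV
    simp only [pvCD, List.mem_cons, List.not_mem_nil, or_false] at hD
    simp only [pvCF, List.mem_cons, List.not_mem_nil, or_false] at hF
    simp only [pvCV, List.mem_cons, List.not_mem_nil, or_false] at hV
    push_neg at hD hF hV
    obtain ⟨d1, d2, d3, d4⟩ := hD
    obtain ⟨f1, f2, f3⟩ := hF
    obtain ⟨v1, v2⟩ := hV
    have hmk : pvCategoryOf = PySem.Dict.mk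
      [("Problem", "Desirability"), ("Customer Segment", "Desirability"),
       ("Unique Value Proposition", "Desirability"), ("Channels", "Desirability"),
       ("Solution", "Feasibility"), ("Unfair Advantage", "Feasibility"),
       ("Key Metrics", "Feasibility"),
       ("Revenue Stream", "Viability"), ("Cost Structure", "Viability")] := by decide
    rw [hmk]
    simp [beq_iff_eq, Ne.symm d1, Ne.symm d2, Ne.symm d3, Ne.symm d4,
          Ne.symm f1, Ne.symm f2, Ne.symm f3, Ne.symm v1, Ne.symm v2, PySem.Dict.get?]

-- B's fold over any key list, from the three fixed categories
theorem pv_fold_step (K : List String) : ∀ x y z : Int,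
    K.foldl pvStep (PySem.Dict.mk [("Desirability", x), ("Feasibility", y), ("Viability", z)]) =
    PySem.Dict.mk [("Desirability", x + K.countP (fun k => k ∈ pvCD)),
                   ("Feasibility", y + K.countP (fun k => k ∈ pvCF)),
                   ("Viability", z + K.countP (fun k => k ∈ pvCV))] := by
  induction K with
  | nil => intro x y z; simp
  | cons k K ih =>
    intro x y z
    obtain ⟨gD, gF, gV, gN⟩ := pv_get_mem k
    by_cases hD : k ∈ pvCD
    · have hF : k ∉ pvCF := by
        simp only [pvCD, List.mem_cons, List.not_mem_nil, or_false] at hD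
        rcases hD with rfl | rfl | rfl | rfl <;> decide
      have hV : k ∉ pvCV := by
        simp only [pvCD, List.mem_cons, List.not_mem_nil, or_false] at hD
        rcases hD with rfl | rfl | rfl | rfl <;> decide
      rw [List.foldl_cons, pvStep_some x y z k _ (gD hD) (Or.inl rfl)]
      simp only [List.countP_cons, ih]
      simp [hD, hF, hV]
      omega
    · by_cases hF : k ∈ pvCF
      · have hV : k ∉ pvCV := by
          simp only [pvCF, List.mem_cons, List.not_mem_nil, or_false] at hF
          rcases hF with rfl | rfl | rfl <;> decide
        rw [List.foldl_cons, pvStep_some x y z k _ (gF hF) (Or.inr (Or.inl rfl))]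
        simp only [List.countP_cons, ih]
        simp [hD, hF, hV]
        omega
      · by_cases hV : k ∈ pvCV
        · rw [List.foldl_cons, pvStep_some x y z k _ (gV hV) (Or.inr (Or.inr rfl))]
          simp only [List.countP_cons, ih]
          simp [hD, hF, hV]
          omega
        · rw [List.foldl_cons, pvStep_none _ k (gN hD hF hV)]
          simp only [List.countP_cons, ih]
          simp [hD, hF, hV]

-- swapping the two sides of "count the common elements" on duplicate-free lists
theorem pv_countP_swap (K c : List String) (hK : K.Nodup) (hc : c.Nodup) :
    c.countP (fun x => x ∈ K) = K.countP (fun k => k ∈ c) := by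
  rw [List.countP_eq_length_filter, List.countP_eq_length_filter]
  rw [← List.toFinset_card_of_nodup (hc.filter _), ← List.toFinset_card_of_nodup (hK.filter _)]
  congr 1
  apply Finset.ext
  intro a
  simp [And.comm]

-- 'criterion in percentage_dict' is membership among the (deduplicated) keys
theorem pv_any (pd : List (String × Int)) (c : String) :
    (pd.any fun p => p.1 == c) = decide (c ∈ pd.map Prod.fst) := by
  induction pd with
  | nil => simp
  | cons p pd ih =>
    simp only [List.any_cons, ih]
    by_cases h : p.1 = c
    · simp [h]
    · by_cases hm : c ∈ List.map Prod.fst pd <;> simp [hm, h, Ne.symm h]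

theorem pv_contains (pd : List (String × Int)) (c : String) :
    (PySem.Dict.mk pd).contains c = decide (c ∈ PySem.List.dedup (pd.map Prod.fst)) := by
  simp only [PySem.Dict.contains,
    decide_eq_decide.mpr (PySem.List.mem_dedup (pd.map Prod.fst) c)]
  exact pv_any pd c

-- A's per-category sum over a duplicate-free criteria list as a countP over the keys
theorem pv_sum_eq_countP (pd : List (String × Int)) (c : List String) (hc : c.Nodup) :
    (c.map (fun criterion =>
      if (PySem.Dict.mk pd).contains criterion then (1 : Int) else 0)).sum =
    ((PySem.List.dedup (pd.map Prod.fst)).countP (fun k => k ∈ c) : Int) := by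
  rw [← pv_countP_swap _ c (PySem.List.nodup_dedup _) hc]
  induction c with
  | nil => simp
  | cons a c ihc =>
    simp only [List.map_cons, List.sum_cons, List.countP_cons, ihc hc.of_cons]
    rw [pv_contains]
    by_cases ha : a ∈ PySem.List.dedup (pd.map Prod.fst) <;> simp [ha] <;> omega

-- ===== VERDICT (by name: the statement is the Claim_ definition above) =====
theorem count_criteria_spec : Claim_equal_count_criteria := by
  intro pd _
  unfold Spec_count_criteria
  show count_criteria pd = count_criteria_alt pd
  have h0 : PySem.Dict.ofList [("Desirability", (0 : Int)), ("Feasibility", 0), ("Viability", 0)]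
      = PySem.Dict.mk [("Desirability", 0), ("Feasibility", 0), ("Viability", 0)] := by decide
  simp only [count_criteria_alt, h0, pv_fold_step, PySem.Dict.items]
  simp only [count_criteria, List.foldl_cons, List.foldl_nil]
  rw [pv_sum_eq_countP pd ["Problem", "Customer Segment", "Unique Value Proposition", "Channels"] (by decide),
      pv_sum_eq_countP pd ["Solution", "Unfair Advantage", "Key Metrics"] (by decide),
      pv_sum_eq_countP pd ["Revenue Stream", "Cost Structure"] (by decide)]
  simp [PySem.Dict.empty, PySem.Dict.insert, PySem.Dict.items, pvCD, pvCF, pvCV]
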